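-- pv_equiv track=rewrite | github.com/bob8dod/Preparing_CodingTest | Programmers/ETC/P87390.py | solution
-- ===== SOURCE A (Python) =====
-- def solution(n, left, right):
--
--     left_idx = [left//n, left%n]
--     right_idx = [right//n, right%n]
--     result = []
--     flag = 0
--     for i in range(left_idx[0], right_idx[0]+1):
--         for j in range(n):
--             if [i,j] == left_idx: flag = 1
--             if flag == 1: result.append(max(i,j)+1)
--             if [i,j] == right_idx:
--                 return result
-- ===== SOURCE B (Python) =====
-- def solution(n, left, right):
--     return [max(k // n, k % n) + 1 for k in range(left, right + 1)]
-- ===== Notes on version B (the rewrite author's own statement) =====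
-- stated objective: simpler
-- what changed: Replaces A's flag-driven nested row/column walk with early return by a single pass over the linear index range left..right, computing each value directly as max(k//n, k%n)+1.
-- outside the precondition, e.g. on solution(2, 4, 1): A returns None, B returns []; on solution(-2, 0, 1): A returns None, B returns [1, 0]; on solution(0, 0, 1): A raises ZeroDivisionError, B raises ZeroDivisionError
import Mathlib
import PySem

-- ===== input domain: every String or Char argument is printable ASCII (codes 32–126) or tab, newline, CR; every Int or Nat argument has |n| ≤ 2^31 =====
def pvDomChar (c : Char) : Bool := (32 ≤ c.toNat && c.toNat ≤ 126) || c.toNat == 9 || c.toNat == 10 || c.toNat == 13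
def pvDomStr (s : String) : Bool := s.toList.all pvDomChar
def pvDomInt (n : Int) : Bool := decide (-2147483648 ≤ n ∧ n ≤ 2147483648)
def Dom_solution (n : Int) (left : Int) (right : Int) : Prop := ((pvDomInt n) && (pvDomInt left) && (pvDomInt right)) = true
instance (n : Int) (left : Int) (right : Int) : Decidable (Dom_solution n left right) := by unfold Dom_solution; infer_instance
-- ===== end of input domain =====

-- B replaces A's flag-driven 2D walk (nested row/column loops with an early return)
-- by one direct pass over the linear indices left..right; objective: simpler.

-- ===== PORT A =====
-- one body of A's inner loop: state is Except result (flag, result); .error models the early return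
def solutionStep (ls lj rs rj : Int) (st : Except (List Int) (Int × List Int))
    (i j : Int) : Except (List Int) (Int × List Int) :=
  match st with
  | .error r => .error r
  | .ok (flag, result) =>
    let flag := if i = ls ∧ j = lj then 1 else flag
    let result := if flag = 1 then result ++ [max i j + 1] else result
    if i = rs ∧ j = rj then .error result else .ok (flag, result)

-- inner 'for j in range(n)' loop; stops (like Python's return) as soon as right_idx is hit
def rowLoop (ls lj rs rj i : Int) (fuel : Nat) (j : Int) (st : Int × List Int) :
    Except (List Int) (Int × List Int) :=
  match fuel with
  | 0 => .ok st
  | fuel + 1 =>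
    match solutionStep ls lj rs rj (.ok st) i j with
    | .error r => .error r
    | .ok st' => rowLoop ls lj rs rj i fuel (j + 1) st'

-- outer 'for i in range(left_idx[0], right_idx[0]+1)' loop
def outerLoop (n ls lj rs rj : Int) (fuel : Nat) (i : Int) (st : Int × List Int) :
    Except (List Int) (Int × List Int) :=
  match fuel with
  | 0 => .ok st
  | fuel + 1 =>
    match rowLoop ls lj rs rj i n.toNat 0 st with
    | .error r => .error r
    | .ok st' => outerLoop n ls lj rs rj fuel (i + 1) st'

def solution (n : Int) (left : Int) (right : Int) : List Int :=
  let ls := PySem.Int.floordiv left n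
  let lj := PySem.Int.mod left n
  let rs := PySem.Int.floordiv right n
  let rj := PySem.Int.mod right n
  match outerLoop n ls lj rs rj (rs + 1 - ls).toNat ls (0, []) with
  | .error r => r
  | .ok _ => []   -- Python falls off the loops and returns None here; Pre_solution excludes these inputs

-- ===== PORT B =====
def solution_alt (n : Int) (left : Int) (right : Int) : List Int :=
  (PySem.List.pyRange left (right + 1) 1).map
    (fun k => max (PySem.Int.floordiv k n) (PySem.Int.mod k n) + 1)

-- ===== PRECONDITION & SPEC =====
-- Pre_ excludes n = 0 (A raises ZeroDivisionError) and the inputs (n ≤ 0, or left//n > right//n)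
-- on which A falls off its loops and returns None, which is not a list.
def Pre_solution (n : Int) (left : Int) (right : Int) : Prop :=
  1 ≤ n ∧ PySem.Int.floordiv left n ≤ PySem.Int.floordiv right n
instance (n : Int) (left : Int) (right : Int) : Decidable (Pre_solution n left right) := by
  unfold Pre_solution; infer_instance

def pvWitness_solution : Int × Int × Int := (3, 2, 7)

def Spec_solution (n : Int) (left : Int) (right : Int) (out : List Int) : Prop := out = solution_alt n left right
instance (n : Int) (left : Int) (right : Int) (out : List Int) : Decidable (Spec_solution n left right out) := by unfold Spec_solution; infer_instance

-- ===== CLAIM (what is proved, stated in full; the proofs are below) =====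
def Claim_equal_solution : Prop := ∀ (n : Int) (left : Int) (right : Int), Dom_solution n left right → Pre_solution n left right → Spec_solution n left right (solution n left right)

-- ===== LEMMAS AND PROOFS =====

-- A's step on the linear index k (the cell (k//n, k%n))
def pvLin (n ls lj rs rj : Int) (st : Except (List Int) (Int × List Int)) (k : Int) :
    Except (List Int) (Int × List Int) :=
  solutionStep ls lj rs rj st (PySem.Int.floordiv k n) (PySem.Int.mod k n)

def pvG (n k : Int) : Int := max (PySem.Int.floordiv k n) (PySem.Int.mod k n) + 1

-- basic div/mod facts
theorem pv_reconstruct (n k : Int) :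
    PySem.Int.floordiv k n * n + PySem.Int.mod k n = k :=
  PySem.Int.floordiv_mul_add_mod k n

theorem pv_mod_bounds (n k : Int) (hn : 0 < n) :
    0 ≤ PySem.Int.mod k n ∧ PySem.Int.mod k n < n := by
  rw [PySem.Int.mod_eq_emod_of_pos hn]
  exact ⟨Int.emod_nonneg k (by omega), Int.emod_lt_of_pos k hn⟩

-- cond (floordiv k n = q ∧ mod k n = r) determines k
theorem pv_cond_iff (n k q r : Int) (hn : 0 < n) (h : q * n + r = k)
    (hr0 : 0 ≤ r) (hrn : r < n) :
    (PySem.Int.floordiv k n = q ∧ PySem.Int.mod k n = r) ↔ True := by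
  constructor
  · intro _; trivial
  · intro _
    have hexp : (q + 1) * n = q * n + n := by ring
    have hd : PySem.Int.floordiv k n = q := by
      rw [PySem.Int.floordiv_eq_iff_of_pos hn, hexp]; omega
    refine ⟨hd, ?_⟩
    have hrec := pv_reconstruct n k
    rw [hd] at hrec
    omega

theorem pv_cond_eq (n k q r : Int) (hn : 0 < n) (hr0 : 0 ≤ r) (hrn : r < n) :
    (PySem.Int.floordiv k n = q ∧ PySem.Int.mod k n = r) ↔ k = q * n + r := by
  constructor
  · rintro ⟨h1, h2⟩
    have hrec := pv_reconstruct n k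
    rw [h1, h2] at hrec
    omega
  · intro hk
    exact ((pv_cond_iff n k q r hn (by omega) hr0 hrn).2 trivial)

-- fold over flatMap / map plumbing
theorem pv_err_absorb (n ls lj rs rj : Int) (r : List Int) (ks : List Int) :
    ks.foldl (pvLin n ls lj rs rj) (.error r) = .error r := by
  induction ks with
  | nil => rfl
  | cons k t ih => simpa [pvLin, solutionStep] using ih

theorem pv_step_absorb (ls lj rs rj i : Int) (r : List Int) (ks : List Int) :
    ks.foldl (fun e x => solutionStep ls lj rs rj e i x) (.error r) = .error r := by
  induction ks with
  | nil => rfl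
  | cons k t ih => simpa [solutionStep] using ih

theorem pv_rowLoop_eq (ls lj rs rj i : Int) : ∀ (fuel : Nat) (j : Int) (st : Int × List Int),
    rowLoop ls lj rs rj i fuel j st
      = (PySem.List.pyRange j (j + fuel) 1).foldl (fun e x => solutionStep ls lj rs rj e i x) (.ok st) := by
  intro fuel
  induction fuel with
  | zero =>
    intro j st
    simp only [Nat.cast_zero, add_zero, rowLoop]
    rw [PySem.List.pyRange_one_eq_nil (le_refl j)]
    rfl
  | succ f ih =>
    intro j st
    rw [show ((f + 1 : Nat) : Int) = (f : Int) + 1 by push_cast; ring]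
    have hlt : j < j + ((f : Int) + 1) := by have := Int.natCast_nonneg f; omega
    rw [PySem.List.pyRange_one_cons hlt, List.foldl_cons]
    show (match solutionStep ls lj rs rj (.ok st) i j with
          | Except.error r => Except.error r
          | Except.ok st' => rowLoop ls lj rs rj i f (j + 1) st') = _
    cases h : solutionStep ls lj rs rj (.ok st) i j with
    | error r => rw [pv_step_absorb]
    | ok st' =>
      dsimp only
      rw [ih (j + 1) st', show j + ((f : Int) + 1) = j + 1 + (f : Int) by ring]

theorem pv_row_range (n : Int) :
    PySem.List.pyRange 0 (0 + ((n.toNat : Nat) : Int)) 1 = PySem.List.pyRange 0 n 1 := by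
  by_cases h : 0 ≤ n
  · rw [show (0 : Int) + ((n.toNat : Nat) : Int) = n by omega]
  · rw [PySem.List.pyRange_one_eq_nil (by omega), PySem.List.pyRange_one_eq_nil (by omega)]

theorem pv_inner_absorb (n ls lj rs rj : Int) (r : List Int) (is : List Int) :
    is.foldl (fun e x => (PySem.List.pyRange 0 n 1).foldl (fun e j => solutionStep ls lj rs rj e x j) e)
      (.error r) = .error r := by
  induction is with
  | nil => rfl
  | cons i t ih => rw [List.foldl_cons, pv_step_absorb]; exact ih

theorem pv_outerLoop_eq (n ls lj rs rj : Int) : ∀ (fuel : Nat) (i : Int) (st : Int × List Int),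
    outerLoop n ls lj rs rj fuel i st
      = (PySem.List.pyRange i (i + fuel) 1).foldl
          (fun e x => (PySem.List.pyRange 0 n 1).foldl (fun e j => solutionStep ls lj rs rj e x j) e)
          (.ok st) := by
  intro fuel
  induction fuel with
  | zero =>
    intro i st
    simp only [Nat.cast_zero, add_zero, outerLoop]
    rw [PySem.List.pyRange_one_eq_nil (le_refl i)]
    rfl
  | succ f ih =>
    intro i st
    rw [show ((f + 1 : Nat) : Int) = (f : Int) + 1 by push_cast; ring]
    have hlt : i < i + ((f : Int) + 1) := by have := Int.natCast_nonneg f; omega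
    rw [PySem.List.pyRange_one_cons hlt, List.foldl_cons]
    show (match rowLoop ls lj rs rj i n.toNat 0 st with
          | Except.error r => Except.error r
          | Except.ok st' => outerLoop n ls lj rs rj f (i + 1) st') = _
    rw [pv_rowLoop_eq, pv_row_range]
    cases h : (PySem.List.pyRange 0 n 1).foldl (fun e x => solutionStep ls lj rs rj e i x) (.ok st) with
    | error r => rw [pv_inner_absorb]
    | ok st' =>
      dsimp only
      rw [ih (i + 1) st', show i + ((f : Int) + 1) = i + 1 + (f : Int) by ring]

-- inner loop over j = row i as a fold over the linear indices of row i
theorem pv_row (n ls lj rs rj i : Int) (hn : 0 < n)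
    (st : Except (List Int) (Int × List Int)) :
    (PySem.List.pyRange 0 n 1).foldl (fun st j => solutionStep ls lj rs rj st i j) st
      = (PySem.List.pyRange (i * n) (i * n + n) 1).foldl (pvLin n ls lj rs rj) st := by
  rw [PySem.List.pyRange_one 0 n, PySem.List.pyRange_one (i * n) (i * n + n)]
  simp only [List.foldl_map]
  have hlen : (n - 0).toNat = (i * n + n - i * n).toNat := by omega
  rw [hlen]
  apply PySem.List.foldl_congr_mem
  intro st' j hj
  have hj' : (j : Int) < n := by
    have := List.mem_range.mp hj
    omega
  have hj0 : (0 : Int) ≤ (j : Int) := Int.natCast_nonneg j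
  have hd : PySem.Int.floordiv (i * n + j) n = i ∧ PySem.Int.mod (i * n + j) n = (j : Int) :=
    (pv_cond_iff n (i * n + j) i j hn rfl hj0 hj').2 trivial
  simp [pvLin, hd.1, hd.2]

-- outer loop over m rows starting at row a = fold over the linear indices a*n .. (a+m)*n
theorem pv_rows (n ls lj rs rj : Int) (hn : 0 < n) (m : Nat) :
    ∀ (a : Int) (st : Except (List Int) (Int × List Int)),
      (PySem.List.pyRange a (a + m) 1).foldl
        (fun st i => (PySem.List.pyRange 0 n 1).foldl (fun st j => solutionStep ls lj rs rj st i j) st) st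
      = (PySem.List.pyRange (a * n) ((a + m) * n) 1).foldl (pvLin n ls lj rs rj) st := by
  induction m with
  | zero =>
    intro a st
    simp only [Nat.cast_zero, add_zero]
    rw [PySem.List.pyRange_one_eq_nil (le_refl a), PySem.List.pyRange_one_eq_nil (le_refl (a * n))]
    rfl
  | succ m ih =>
    intro a st
    rw [show ((m + 1 : Nat) : Int) = (m : Int) + 1 by push_cast; ring]
    have h1 : a < a + ((m : Int) + 1) := by
      have := Int.natCast_nonneg m; omega
    have hb1 : a * n ≤ (a + 1) * n :=
      mul_le_mul_of_nonneg_right (by omega) (by omega)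
    have hb2 : (a + 1) * n ≤ (a + 1 + (m : Int)) * n :=
      mul_le_mul_of_nonneg_right (by have := Int.natCast_nonneg m; omega) (by omega)
    have hsplit : PySem.List.pyRange (a * n) ((a + ((m : Int) + 1)) * n) 1
        = PySem.List.pyRange (a * n) (a * n + n) 1
          ++ PySem.List.pyRange ((a + 1) * n) ((a + 1 + (m : Int)) * n) 1 := by
      have e1 : (a + 1) * n = a * n + n := by ring
      have e2 : (a + ((m : Int) + 1)) * n = (a + 1 + (m : Int)) * n := by ring
      rw [e2, ← e1]
      exact PySem.List.pyRange_one_append _ _ _ hb1 hb2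
    rw [PySem.List.pyRange_one_cons h1, List.foldl_cons, hsplit, List.foldl_append,
        ← pv_row n ls lj rs rj a hn st,
        show a + ((m : Int) + 1) = a + 1 + (m : Int) by ring]
    exact ih (a + 1) _

-- skip phase: before left is seen and before right, state stays (0, [])
theorem pv_skip (n ls lj rs rj left right : Int) (hn : 0 < n)
    (hls : PySem.Int.floordiv left n = ls) (hlj : PySem.Int.mod left n = lj)
    (hrs : PySem.Int.floordiv right n = rs) (hrj : PySem.Int.mod right n = rj)
    (ks : List Int) (h : ∀ k ∈ ks, k ≠ left ∧ k ≠ right) :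
    ks.foldl (pvLin n ls lj rs rj) (.ok (0, [])) = .ok (0, []) := by
  have hlrec : ls * n + lj = left := by rw [← hls, ← hlj]; exact pv_reconstruct n left
  have hrrec : rs * n + rj = right := by rw [← hrs, ← hrj]; exact pv_reconstruct n right
  have hlb : 0 ≤ lj ∧ lj < n := by rw [← hlj]; exact pv_mod_bounds n left hn
  have hrb : 0 ≤ rj ∧ rj < n := by rw [← hrj]; exact pv_mod_bounds n right hn
  induction ks with
  | nil => rfl
  | cons k t ih =>
    have hk := h k (List.mem_cons_self)
    have hcl : ¬ (PySem.Int.floordiv k n = ls ∧ PySem.Int.mod k n = lj) := by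
      rw [pv_cond_eq n k ls lj hn (by omega) (by omega)]
      omega
    have hcr : ¬ (PySem.Int.floordiv k n = rs ∧ PySem.Int.mod k n = rj) := by
      rw [pv_cond_eq n k rs rj hn (by omega) (by omega)]
      omega
    rw [List.foldl_cons]
    have hstep : pvLin n ls lj rs rj (.ok (0, [])) k = .ok (0, []) := by
      simp [pvLin, solutionStep, hcl, hcr]
    rw [hstep]
    exact ih (fun k hk => h k (List.mem_cons_of_mem _ hk))

-- accumulate phase: once the flag is 1 and right not yet reached, the values are appended
theorem pv_acc (n ls lj rs rj right : Int) (hn : 0 < n)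
    (hrs : PySem.Int.floordiv right n = rs) (hrj : PySem.Int.mod right n = rj)
    (ks : List Int) :
    ∀ (acc : List Int), (∀ k ∈ ks, k ≠ right) →
      ks.foldl (pvLin n ls lj rs rj) (.ok (1, acc)) = .ok (1, acc ++ ks.map (pvG n)) := by
  have hrrec : rs * n + rj = right := by rw [← hrs, ← hrj]; exact pv_reconstruct n right
  have hrb : 0 ≤ rj ∧ rj < n := by rw [← hrj]; exact pv_mod_bounds n right hn
  induction ks with
  | nil => intro acc _; simp
  | cons k t ih =>
    intro acc h
    have hk := h k (List.mem_cons_self)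
    have hcr : ¬ (PySem.Int.floordiv k n = rs ∧ PySem.Int.mod k n = rj) := by
      rw [pv_cond_eq n k rs rj hn (by omega) (by omega)]
      omega
    rw [List.foldl_cons]
    have hflag : (if PySem.Int.floordiv k n = ls ∧ PySem.Int.mod k n = lj then (1:Int) else 1) = 1 := by
      split <;> rfl
    simp only [pvLin, solutionStep, hflag, if_neg hcr, if_true]
    rw [ih (acc ++ [max (PySem.Int.floordiv k n) (PySem.Int.mod k n) + 1])
        (fun k hk => h k (List.mem_cons_of_mem _ hk))]
    simp [pvG]

-- step at right (flag already 1)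
theorem pv_at_right_flag (n ls lj rs rj right : Int)
    (hrs : PySem.Int.floordiv right n = rs) (hrj : PySem.Int.mod right n = rj)
    (acc : List Int) :
    pvLin n ls lj rs rj (.ok (1, acc)) right = .error (acc ++ [pvG n right]) := by
  have hflag : (if PySem.Int.floordiv right n = ls ∧ PySem.Int.mod right n = lj then (1:Int) else 1) = 1 := by
    split <;> rfl
  simp only [pvLin, solutionStep, hflag, if_true, if_pos (And.intro hrs hrj), pvG]

-- the main characterisation of A's linear fold
theorem pv_main (n left right : Int) (hn : 0 < n)
    (hle : PySem.Int.floordiv left n ≤ PySem.Int.floordiv right n) :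
    solution n left right = solution_alt n left right := by
  have hlb := pv_mod_bounds n left hn
  have hrb := pv_mod_bounds n right hn
  have hlrec := pv_reconstruct n left
  have hrrec := pv_reconstruct n right
  set ls := PySem.Int.floordiv left n with hls
  set lj := PySem.Int.mod left n with hlj
  set rs := PySem.Int.floordiv right n with hrs
  set rj := PySem.Int.mod right n with hrj
  -- rewrite the nested fold as the linear fold
  have hm : rs + 1 = ls + ((rs + 1 - ls).toNat : Int) := by omega
  have hrows := pv_rows n ls lj rs rj hn (rs + 1 - ls).toNat ls (.ok (0, []))
  simp only [solution, ← hls, ← hlj, ← hrs, ← hrj]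
  rw [pv_outerLoop_eq, hrows, ← hm]
  have hexp : (rs + 1) * n = rs * n + n := by ring
  have hmul : ls * n ≤ rs * n := mul_le_mul_of_nonneg_right hle (by omega)
  have hLle : ls * n ≤ left := by omega
  have hRlt : right < (rs + 1) * n := by omega
  have hLright : ls * n ≤ right := by omega
  by_cases hlr : left ≤ right
  · -- split at left, then walk left .. right
    have hleftR : left ≤ (rs + 1) * n := by omega
    rw [PySem.List.pyRange_one_append (ls * n) left ((rs + 1) * n) hLle hleftR,
        List.foldl_append]
    rw [pv_skip n ls lj rs rj left right hn hls.symm hlj.symm hrs.symm hrj.symm _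
        (by intro k hk; have := PySem.List.mem_pyRange_one.mp hk; omega)]
    rw [PySem.List.pyRange_one_append left (right + 1) ((rs + 1) * n) (by omega) (by omega),
        List.foldl_append]
    rw [PySem.List.pyRange_one_cons (show left < right + 1 by omega), List.foldl_cons]
    by_cases heq : left = right
    · subst heq
      have hstep : pvLin n ls lj rs rj (.ok (0, [])) left = .error ([] ++ [pvG n left]) := by
        simp only [pvLin, solutionStep, if_pos (And.intro hls.symm hlj.symm)]
        rw [if_pos (And.intro hrs.symm hrj.symm)]
        simp [pvG]
      rw [hstep, pv_err_absorb, pv_err_absorb]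
      simp only [solution_alt]
      rw [PySem.List.pyRange_one_cons (show left < left + 1 by omega),
          PySem.List.pyRange_one_eq_nil (le_refl (left + 1))]
      simp [pvG, ← hls, ← hlj]
    · have hlt : left < right := by omega
      have hcr : ¬ (ls = rs ∧ lj = rj) := by
        rintro ⟨h1, h2⟩
        rw [h1, h2] at hlrec
        omega
      have hstep : pvLin n ls lj rs rj (.ok (0, [])) left = .ok (1, [pvG n left]) := by
        simp only [pvLin, solutionStep, if_pos (And.intro hls.symm hlj.symm)]
        rw [if_neg (show ¬ (PySem.Int.floordiv left n = rs ∧ PySem.Int.mod left n = rj) from by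
              rw [← hls, ← hlj]; exact hcr)]
        simp [pvG]
      rw [hstep]
      rw [PySem.List.pyRange_one_succ_right (show left + 1 ≤ right by omega), List.foldl_append]
      rw [pv_acc n ls lj rs rj right hn hrs.symm hrj.symm _ _
          (by intro k hk; have := PySem.List.mem_pyRange_one.mp hk; omega)]
      rw [List.foldl_cons, pv_at_right_flag n ls lj rs rj right hrs.symm hrj.symm,
          pv_err_absorb, pv_err_absorb]
      simp only [solution_alt]
      rw [PySem.List.pyRange_one_cons (show left < right + 1 by omega),
          PySem.List.pyRange_one_succ_right (show left + 1 ≤ right by omega)]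
      simp [pvG]
  · -- right < left: A returns [] at right before the flag is ever set
    have hrl : right < left := by omega
    rw [PySem.List.pyRange_one_append (ls * n) right ((rs + 1) * n) hLright (by omega),
        List.foldl_append]
    rw [pv_skip n ls lj rs rj left right hn hls.symm hlj.symm hrs.symm hrj.symm _
        (by intro k hk; have := PySem.List.mem_pyRange_one.mp hk; omega)]
    rw [PySem.List.pyRange_one_cons (show right < (rs + 1) * n from hRlt), List.foldl_cons]
    have hcl : ¬ (PySem.Int.floordiv right n = ls ∧ PySem.Int.mod right n = lj) := by
      rw [pv_cond_eq n right ls lj hn (by omega) (by omega)]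
      omega
    have hc2 : PySem.Int.floordiv right n = rs ∧ PySem.Int.mod right n = rj :=
      ⟨hrs.symm, hrj.symm⟩
    have hstep : pvLin n ls lj rs rj (.ok (0, [])) right = .error [] := by
      simp only [pvLin, solutionStep, if_neg hcl, if_pos hc2,
        if_neg (show ¬ (0 : Int) = 1 by norm_num)]
    rw [hstep, pv_err_absorb]
    simp only [solution_alt]
    rw [PySem.List.pyRange_one_eq_nil (show right + 1 ≤ left by omega)]
    rfl

-- ===== VERDICT (by name: the statement is the Claim_ definition above) =====
theorem solution_spec : Claim_equal_solution := by
  intro n left right _ hpre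
  unfold Spec_solution
  exact pv_main n left right (by exact_mod_cast hpre.1) hpre.2
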